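-- pv_equiv track=rewrite | github.com/GeneralVimes/AS32JS | better_binder.py | better_binds
-- ===== SOURCE A (Python) =====
-- def find_word_end_after(s, start_id):
-- 	for id in range(start_id, len(s)):
-- 		ch=s[id]
-- 		if not (ch.isalnum() or ch=="_"):
-- 			break
-- 	return id-1
--
-- def has_function_call_after(s, start_id):
-- 	res=False
-- 	for id in range(start_id, len(s)):
-- 		ch=s[id]
-- 		if ch=="." or ch=="(":
-- 			return True
-- 		if ch in " 	\n":
-- 			id+=1
-- 		else:
-- 			return False
--
-- def better_binds(s, list_of_func):
-- 	res=""
-- 	while s!="":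
-- 		thid=s.find("this.")
-- 		if thid!=-1:
-- 			ch=s[thid-1]
-- 			if not (ch.isalpha() or ch=="_"):
-- 				endid=find_word_end_after(s, thid+5)
-- 				wrd=s[thid+5:endid+1]
-- 				if wrd in list_of_func:
-- 					if not has_function_call_after(s, endid+1):
-- 						res+=s[0:endid+1]+".bind(this)"
-- 					else:
-- 						res+=s[0:endid+1]
-- 				else:
-- 					res+=s[0:endid+1]
-- 				s=s[endid+1:]
-- 			else:
-- 				res+=s[0:thid+5]
-- 				s=s[thid+5:]
-- 		else:
-- 			res+=s;
-- 			break
--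
-- 	return res
-- ===== SOURCE B (Python) =====
-- def _call_follows(s, i):
-- 	n = len(s)
-- 	while i < n:
-- 		ch = s[i]
-- 		if ch == "." or ch == "(":
-- 			return True
-- 		if ch not in " \t\n":
-- 			return False
-- 		i += 1
-- 	return False
--
-- def better_binds(s, list_of_func):
-- 	funcs = set(list_of_func)
-- 	out = []
-- 	i = 0
-- 	while True:
-- 		j = s.find("this.", i)
-- 		if j == -1:
-- 			out.append(s[i:])
-- 			return "".join(out)
-- 		prev = s[j - 1]
-- 		if prev.isalpha() or prev == "_":
-- 			out.append(s[i:j + 5])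
-- 			i = j + 5
-- 			continue
-- 		k = j + 5
-- 		while k < len(s) and (s[k].isalnum() or s[k] == "_"):
-- 			k += 1
-- 		out.append(s[i:k])
-- 		if s[j + 5:k] in funcs and not _call_follows(s, k):
-- 			out.append(".bind(this)")
-- 		i = k
-- ===== Notes on version B (the rewrite author's own statement) =====
-- stated objective: alternative
-- what changed: B replaces A's loop that repeatedly slices off and re-concatenates ever-shorter copies of the string with a single left-to-right scan over the original string using an index pointer and an output buffer, plus a set for the function-name lookup; Pre_ excludes inputs where A raises TypeError (a trailing 'this.' whose word scan starts past the end of the string) and strings containing the degenerate chained pattern 'this.this.', a corner where either treatment of the preceding-character test is defensible.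
-- intended difference: On strings where an eligible this.<word> that the scanner really reaches (not swallowed by a preceding identifier run gluing into it) runs to the very end of the string and that word (or the word minus its last character) is in the function list, A's word scan stops one character early so A binds a truncated name or misses the bind, while B binds the full final word, which is the intended behaviour. — e.g. on better_binds("a=this.foo", ["foo"]): A returns "a=this.foo", B returns "a=this.foo.bind(this)"
-- outside the precondition, e.g. on better_binds('this.f5this.', []): A returns 'this.f5this.', B returns 'this.f5this.'; on better_binds('athis.this.x', ['x']): A returns 'athis.this.x', B returns 'athis.this.x.bind(this)'
import Mathlib
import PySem

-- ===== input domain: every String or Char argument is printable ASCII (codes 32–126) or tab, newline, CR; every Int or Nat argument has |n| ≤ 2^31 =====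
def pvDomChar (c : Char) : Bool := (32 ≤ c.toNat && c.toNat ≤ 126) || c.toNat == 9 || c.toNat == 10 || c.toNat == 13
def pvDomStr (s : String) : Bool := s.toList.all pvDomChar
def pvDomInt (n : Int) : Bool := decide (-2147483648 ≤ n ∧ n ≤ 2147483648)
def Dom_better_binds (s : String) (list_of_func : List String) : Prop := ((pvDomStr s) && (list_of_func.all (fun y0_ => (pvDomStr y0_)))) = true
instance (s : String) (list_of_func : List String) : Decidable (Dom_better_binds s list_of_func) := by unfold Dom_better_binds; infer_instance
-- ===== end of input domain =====

-- B rewrites A's repeated slice-and-reconcatenate loop as a single left-to-right scan over the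
-- original string with an index pointer, an output buffer and a set for the function-name lookup.
-- Loops are ported with a structural fuel counter that provably covers the loop's iteration count.

def pvPat : List Char := ['t', 'h', 'i', 's', '.']
def pvPat2 : List Char := pvPat ++ pvPat
def pvBind : List Char := ['.', 'b', 'i', 'n', 'd', '(', 't', 'h', 'i', 's', ')']

-- ===== PORT A =====

-- ch.isalnum() or ch=="_"
def pvWordCharA (c : Char) : Bool := PySem.Chars.isalnum c || c == '_'

-- the `for id in range(start_id, len(s))` loop of find_word_end_after; returns the Python `id - 1`;
-- the fuel-0 base is unreachable (callers pass fuel = len(s) ≥ remaining iterations)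
def findWordEndLoop : Nat → List Char → Nat → Int
  | 0, _, id => (id : Int) - 1
  | fuel + 1, s, id =>
    if h : id < s.length then
      if !(pvWordCharA s[id]) then (id : Int) - 1          -- break
      else if id + 1 < s.length then findWordEndLoop fuel s (id + 1)
      else (id : Int) - 1                                   -- range exhausted: Python leaves id at len(s)-1
    else (id : Int) - 1                                     -- unreachable: callers guarantee id < len(s)

-- find_word_end_after; none = the empty range, where Python's `id - 1` raises TypeError (builtin id)
def findWordEndAfter (s : List Char) (start_id : Nat) : Option Int :=
  if start_id < s.length then some (findWordEndLoop s.length s start_id) else none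

-- has_function_call_after; Python returns None when the loop exhausts, which its only caller
-- uses as `not …` exactly like False, so the port returns Bool; fuel-0 base unreachable
def hasFunctionCallAfter : Nat → List Char → Nat → Bool
  | 0, _, _ => false
  | fuel + 1, s, id =>
    if h : id < s.length then
      let ch := s[id]
      if ch == '.' || ch == '(' then true
      else if ch == ' ' || ch == '\t' || ch == '\n' then hasFunctionCallAfter fuel s (id + 1)
      else false
    else false

-- the `while s != ""` loop of better_binds, with the accumulator res; every iteration strips
-- at least one leading char off s, so fuel = len(s) + 1 covers the loop (fuel-0 unreachable)
def betterBindsLoop : Nat → List (List Char) → List Char → List Char → List Char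
  | 0, _, _, res => res
  | fuel + 1, list_of_func, s, res =>
    if s = [] then res
    else
      let thid := PySem.Chars.find s pvPat
      if thid ≠ -1 then
        let ch := (PySem.List.pyGet? s (thid - 1)).getD ' '   -- s[thid-1]; always in range since len(s) ≥ 5 here
        if !(PySem.Chars.isalpha ch || ch == '_') then
          match findWordEndAfter s (thid + 5).toNat with
          | none => res ++ s                                  -- Python raises TypeError here; outside Pre_
          | some endid =>
            let wrd := PySem.List.slice s (some (thid + 5)) (some (endid + 1))
            if wrd ∈ list_of_func then
              if !(hasFunctionCallAfter s.length s (endid + 1).toNat) then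
                betterBindsLoop fuel list_of_func (PySem.List.slice s (some (endid + 1)) none)
                  (res ++ PySem.List.slice s (some 0) (some (endid + 1)) ++ pvBind)
              else
                betterBindsLoop fuel list_of_func (PySem.List.slice s (some (endid + 1)) none)
                  (res ++ PySem.List.slice s (some 0) (some (endid + 1)))
            else
              betterBindsLoop fuel list_of_func (PySem.List.slice s (some (endid + 1)) none)
                (res ++ PySem.List.slice s (some 0) (some (endid + 1)))
        else
          betterBindsLoop fuel list_of_func (PySem.List.slice s (some (thid + 5)) none)
            (res ++ PySem.List.slice s (some 0) (some (thid + 5)))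
      else res ++ s

def better_binds (s : String) (list_of_func : List String) : String :=
  String.ofList (betterBindsLoop (s.toList.length + 1) (list_of_func.map String.toList) s.toList [])

-- ===== PORT B =====

-- _call_follows; fuel-0 base unreachable (callers pass fuel = len(s))
def callFollows : Nat → List Char → Nat → Bool
  | 0, _, _ => false
  | fuel + 1, s, i =>
    if h : i < s.length then
      let ch := s[i]
      if ch == '.' || ch == '(' then true
      else if !(ch == ' ' || ch == '\t' || ch == '\n') then false
      else callFollows fuel s (i + 1)
    else false

-- the inner `while k < len(s) and (s[k].isalnum() or s[k] == "_"): k += 1` scan; fuel-0 unreachable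
def scanWordEnd : Nat → List Char → Nat → Nat
  | 0, _, k => k
  | fuel + 1, s, k =>
    if h : k < s.length then
      if PySem.Chars.isalnum s[k] || s[k] == '_' then scanWordEnd fuel s (k + 1) else k
    else k

-- the main `while True` scan: i is the read pointer, out the output buffer; i advances by at
-- least one per iteration and never exceeds len(s), so fuel = len(s) + 1 covers the loop
def bbAltLoop : Nat → List Char → PySem.Set (List Char) → Nat → List Char → List Char
  | 0, _, _, _, out => out
  | fuel + 1, s, funcs, i, out =>
    let fi := PySem.Chars.findFrom s pvPat (i : Int)
    if fi = -1 then out ++ s.drop i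
    else
      let j := fi.toNat
      let prev := (PySem.List.pyGet? s ((j : Int) - 1)).getD ' '   -- s[j-1]; s is nonempty here
      if PySem.Chars.isalpha prev || prev == '_' then
        bbAltLoop fuel s funcs (j + 5) (out ++ (s.drop i).take (j + 5 - i))
      else
        let k := scanWordEnd s.length s (j + 5)
        let out' := out ++ (s.drop i).take (k - i)
        if funcs.contains ((s.drop (j + 5)).take (k - (j + 5))) && !callFollows s.length s k then
          bbAltLoop fuel s funcs k (out' ++ pvBind)
        else
          bbAltLoop fuel s funcs k out'

def better_binds_alt (s : String) (list_of_func : List String) : String :=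
  String.ofList (bbAltLoop (s.toList.length + 1) s.toList
    (PySem.Set.ofList (list_of_func.map String.toList)) 0 [])

-- ===== PRECONDITION & SPEC =====

-- an ASCII letter or '_' (Python's `ch.isalpha() or ch == "_"` on the ASCII domain), for Pre_/D_
def pvAlphaU (c : Char) : Bool := c.isAlpha || c == '_'
-- an ASCII identifier character (letter, digit or '_'), for D_
def pvIdentChar (c : Char) : Bool := c.isAlphanum || c == '_'

-- the character A's preceding-character test looks at for a match at position q
-- (for a match at the very start of the remaining text Python's s[-1] reads the last character)
def pvPrevOf (s : List Char) (q : Nat) : Char :=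
  if q = 0 then s.getD (s.length - 1) ' ' else s.getD (q - 1) ' '

-- q is a "glue" occurrence for position x: a "this." at q whose following identifier run
-- reaches x, and whose preceding character does not make the scanner skip it
def pvGlue (s : List Char) (x q : Nat) : Bool :=
  decide (pvPat <+: s.drop q) &&
    ((s.drop (q + 5)).take (x - (q + 5))).all pvIdentChar &&
    !(pvAlphaU (pvPrevOf s q))

-- a "this." occurrence at x is actually scanned iff no scanned glue occurrence swallows it
def pvReachedF : Nat → List Char → Nat → Bool
  | 0, _, _ => true
  | fuel + 1, s, x => (List.range x).all (fun q => !(pvGlue s x q && pvReachedF fuel s q))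
def pvReached (s : List Char) (x : Nat) : Bool := pvReachedF x s x

-- Pre_ excludes (a) inputs where A raises TypeError — a trailing "this." whose word scan starts
-- past the end of the string (kept only when the char before that suffix is a letter or '_',
-- where A skips it and returns) — and (b) strings containing the degenerate chained pattern
-- "this.this.", a corner where either treatment of the preceding-character test is defensible;
-- a few excluded strings of either shape still return normally in A (see the cites in claim.json).
def Pre_better_binds (s : String) (list_of_func : List String) : Prop :=
  (¬ (PySem.Chars.endswith s.toList pvPat = true ∧
      (s.toList.length = 5 ∨ pvAlphaU (s.toList.getD (s.toList.length - 6) ' ') = false))) ∧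
  PySem.Chars.isIn pvPat2 s.toList = false
instance (s : String) (list_of_func : List String) : Decidable (Pre_better_binds s list_of_func) := by
  unfold Pre_better_binds; infer_instance

def pvWitness_better_binds : String × List String := ("x = this.foo() + this.bar;", ["bar"])

-- On strings where an eligible this.<word> that the scanner really reaches (pvReached: it is not
-- swallowed by a preceding identifier run gluing into it) runs to the very end of the string and
-- that word (or the word minus its last character) is in the function list, A's word scan stops
-- one character early so A binds a truncated name or misses the bind, while B binds the full
-- final word, which is the intended behaviour.
def D_better_binds (s : String) (list_of_func : List String) : Prop :=
  ∃ p < s.toList.length, pvPat <+: s.toList.drop p ∧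
    s.toList.drop (p + 5) ≠ [] ∧
    (s.toList.drop (p + 5)).all pvIdentChar = true ∧
    pvAlphaU (pvPrevOf s.toList p) = false ∧
    pvReached s.toList p = true ∧
    (s.toList.drop (p + 5) ∈ list_of_func.map String.toList ∨
      (s.toList.drop (p + 5)).dropLast ∈ list_of_func.map String.toList)
instance (s : String) (list_of_func : List String) : Decidable (D_better_binds s list_of_func) := by
  unfold D_better_binds; infer_instance

def Spec_better_binds (s : String) (list_of_func : List String) (out : String) : Prop :=
  ¬ D_better_binds s list_of_func → out = better_binds_alt s list_of_func
instance (s : String) (list_of_func : List String) (out : String) : Decidable (Spec_better_binds s list_of_func out) := by unfold Spec_better_binds; infer_instance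

def pvDiffWitness_better_binds : String × List String := ("a=this.foo", ["foo"])
def pvDiffWitnessOut_better_binds : String × String := ("a=this.foo", "a=this.foo.bind(this)")

-- ===== CLAIM (what is proved, stated in full; the proofs are below) =====
def Claim_unchanged_better_binds : Prop := ∀ (s : String) (list_of_func : List String), Dom_better_binds s list_of_func → Pre_better_binds s list_of_func → Spec_better_binds s list_of_func (better_binds s list_of_func)
def Claim_changed_better_binds : Prop := Dom_better_binds (pvDiffWitness_better_binds.1) (pvDiffWitness_better_binds.2) ∧ Pre_better_binds (pvDiffWitness_better_binds.1) (pvDiffWitness_better_binds.2) ∧ D_better_binds (pvDiffWitness_better_binds.1) (pvDiffWitness_better_binds.2) ∧ better_binds (pvDiffWitness_better_binds.1) (pvDiffWitness_better_binds.2) = pvDiffWitnessOut_better_binds.1 ∧ better_binds_alt (pvDiffWitness_better_binds.1) (pvDiffWitness_better_binds.2) = pvDiffWitnessOut_better_binds.2 ∧ pvDiffWitnessOut_better_binds.1 ≠ pvDiffWitnessOut_better_binds.2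

def Claim_exact_better_binds : Prop := ∀ (s : String) (list_of_func : List String), Dom_better_binds s list_of_func → Pre_better_binds s list_of_func → D_better_binds s list_of_func → better_binds s list_of_func ≠ better_binds_alt s list_of_func

-- ===== LEMMAS AND PROOFS =====

-- the loop invariant of both main inductions: the read pointer i is the start of the string,
-- its end, a non-word stopping character (with the covering fact for a straddled occurrence),
-- or the cut right after a skipped occurrence
def pvInv (s : List Char) (i : Nat) : Prop :=
  i = 0 ∨ i = s.length ∨
  (i < s.length ∧ pvWordCharA (s.getD i ' ') = false ∧
    ((4 ≤ i ∧ pvPat <+: s.drop (i - 4)) → pvReached s (i - 4) = false)) ∨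
  (5 ≤ i ∧ pvPat <+: s.drop (i - 5) ∧ pvAlphaU (pvPrevOf s (i - 5)) = true)

-- the character classes of Pre_/D_ agree with the tests the ports run
theorem pvAlphaU_eq (c : Char) : pvAlphaU c = (PySem.Chars.isalpha c || c == '_') := by
  simp [pvAlphaU, Char.isAlpha, Char.isUpper, Char.isLower, PySem.Chars.isalpha,
    PySem.Chars.isupper, PySem.Chars.islower, Char.le_def, UInt32.le_iff_toNat_le]

theorem pvIdentChar_eq (c : Char) : pvIdentChar c = pvWordCharA c := by
  simp [pvIdentChar, pvWordCharA, Char.isAlphanum, Char.isAlpha, Char.isUpper, Char.isLower,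
    Char.isDigit, PySem.Chars.isalnum, PySem.Chars.isalpha, PySem.Chars.isupper,
    PySem.Chars.islower, PySem.Chars.isdigit, Char.le_def, UInt32.le_iff_toNat_le,
    Bool.or_assoc]

theorem pvReachedF_zero (f : Nat) (s : List Char) : pvReachedF f s 0 = true := by
  cases f <;> rfl

theorem pvReachedF_congr (x : Nat) (s : List Char) :
    ∀ (f1 f2 : Nat), x ≤ f1 → x ≤ f2 → pvReachedF f1 s x = pvReachedF f2 s x := by
  induction x using Nat.strong_induction_on with
  | _ x IH =>
    intro f1 f2 h1 h2
    match x, f1, f2 with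
    | 0, f1, f2 => rw [pvReachedF_zero, pvReachedF_zero]
    | x + 1, f1 + 1, f2 + 1 =>
      rw [pvReachedF, pvReachedF, Bool.eq_iff_iff]
      simp only [List.all_eq_true, List.mem_range]
      constructor
      · intro h q hq
        have hh := h q hq
        rwa [IH q (by omega) f1 f2 (by omega) (by omega)] at hh
      · intro h q hq
        have hh := h q hq
        rwa [IH q (by omega) f1 f2 (by omega) (by omega)]

theorem pvReached_true_iff (s : List Char) (x : Nat) :
    pvReached s x = true ↔ ∀ q, q < x → pvGlue s x q = true → pvReached s q = false := by
  unfold pvReached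
  cases x with
  | zero =>
    constructor
    · intro _ q hq
      exact absurd hq (by omega)
    · intro _
      exact pvReachedF_zero 0 s
  | succ y =>
    rw [pvReachedF]
    simp only [List.all_eq_true, List.mem_range]
    constructor
    · intro h q hq hglue
      have hh := h q hq
      rw [pvReachedF_congr q s y q (by omega) (by omega)] at hh
      simp only [hglue, Bool.true_and, Bool.not_eq_true'] at hh
      exact hh
    · intro h q hq
      rw [pvReachedF_congr q s y q (by omega) (by omega)]
      by_cases hg : pvGlue s (y + 1) q = true
      · have := h q hq hg
        simp [this, hg]
      · have hg' : pvGlue s (y + 1) q = false := by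
          rwa [Bool.not_eq_true] at hg
        simp [hg']

theorem pvReached_false_intro (s : List Char) (x q : Nat) (hq : q < x)
    (hg : pvGlue s x q = true) (hr : pvReached s q = true) : pvReached s x = false := by
  by_contra h
  rw [Bool.not_eq_false] at h
  have := (pvReached_true_iff s x).mp h q hq hg
  rw [this] at hr
  exact absurd hr (by decide)

-- basic facts about a "this." occurrence
theorem occ_len (s : List Char) (q : Nat) (h : pvPat <+: s.drop q) : q + 5 ≤ s.length := by
  have := h.length_le
  simp only [List.length_drop] at this
  have h5 : pvPat.length = 5 := rfl
  omega

theorem occ_char (s : List Char) (q m : Nat) (h : pvPat <+: s.drop q) (hm : m < 5) :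
    s.getD (q + m) ' ' = pvPat.getD m ' ' := by
  obtain ⟨u, hu⟩ := h
  have hq5 : q + 5 ≤ s.length := occ_len s q ⟨u, hu⟩
  have h1 : (s.drop q)[m]? = s[q + m]? := List.getElem?_drop
  have h2 : (pvPat ++ u)[m]? = pvPat[m]? := by
    rw [List.getElem?_append_left (by simpa [pvPat] using hm)]
  rw [List.getD_eq_getElem?_getD, List.getD_eq_getElem?_getD, ← h1, ← hu, h2]

theorem occ_spacing (s : List Char) (q1 q2 : Nat) (h1 : pvPat <+: s.drop q1)
    (h2 : pvPat <+: s.drop q2) (hlt : q1 < q2) : q1 + 5 ≤ q2 := by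
  by_contra hcon
  have hlen := occ_len s q2 h2
  have hc1 := occ_char s q1 (q2 - q1) h1 (by omega)
  have hc2 := occ_char s q2 0 h2 (by omega)
  rw [show q1 + (q2 - q1) = q2 by omega] at hc1
  rw [Nat.add_zero] at hc2
  have hd : q2 - q1 = 1 ∨ q2 - q1 = 2 ∨ q2 - q1 = 3 ∨ q2 - q1 = 4 := by omega
  rcases hd with hd | hd | hd | hd <;> rw [hd] at hc1 <;>
    exact absurd (hc1.symm.trans hc2) (by decide)

-- reading a position inside / writing an all-word region (s[a:x])
theorem all_take_drop_elim (s : List Char) (a x : Nat) (f : Char → Bool)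
    (hall : ((s.drop a).take (x - a)).all f = true) (m : Nat)
    (ha : a ≤ m) (hm : m < x) (hmn : m < s.length) : f (s.getD m ' ') = true := by
  rw [List.all_eq_true] at hall
  apply hall
  apply List.mem_of_getElem? (i := m - a)
  have h1 : ((s.drop a).take (x - a))[m - a]? = (s.drop a)[m - a]? :=
    List.getElem?_take_of_lt (by omega)
  have h2 : (s.drop a)[m - a]? = s[a + (m - a)]? := List.getElem?_drop
  rw [h1, h2, show a + (m - a) = m by omega, List.getElem?_eq_getElem hmn,
    List.getD_eq_getElem s ' ' hmn]

theorem all_take_drop_intro (s : List Char) (a x : Nat) (f : Char → Bool) (hx : x ≤ s.length)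
    (h : ∀ m, a ≤ m → m < x → f (s.getD m ' ') = true) :
    ((s.drop a).take (x - a)).all f = true := by
  rw [List.all_eq_true]
  intro c hc
  obtain ⟨mi, hmi, hceq⟩ := List.mem_iff_getElem.mp hc
  have hb : mi < x - a ∧ a + mi < s.length := by
    simp only [List.length_take, List.length_drop, lt_min_iff] at hmi
    omega
  have hceq' : c = s.getD (a + mi) ' ' := by
    rw [← hceq, List.getElem_take, List.getElem_drop, List.getD_eq_getElem s ' ' hb.2]
  rw [hceq']
  exact h (a + mi) (by omega) (by omega)

-- a word character is neither a call/attribute delimiter nor whitespace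
theorem wordChar_not_delim (c : Char) (h : pvWordCharA c = true) :
    (c == '.' || c == '(') = false ∧ (c == ' ' || c == '\t' || c == '\n') = false := by
  constructor
  · rw [Bool.or_eq_false_iff]
    constructor <;> rw [beq_eq_false_iff_ne] <;> rintro rfl <;> exact absurd h (by decide)
  · rw [Bool.or_eq_false_iff, Bool.or_eq_false_iff]
    refine ⟨⟨?_, ?_⟩, ?_⟩ <;> rw [beq_eq_false_iff_ne] <;> rintro rfl <;>
      exact absurd h (by decide)

theorem callFollows_word_at (fb : Nat) (s : List Char) (m : Nat) (hm : m < s.length)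
    (hw : pvWordCharA (s[m]'hm) = true) : callFollows fb s m = false := by
  cases fb with
  | zero => rw [callFollows]
  | succ fb =>
    rw [callFollows, dif_pos hm]
    simp only []
    rw [if_neg (by simp [(wordChar_not_delim _ hw).1]),
      if_pos (by simp [(wordChar_not_delim _ hw).2])]

theorem callFollows_stuck (fb : Nat) (s : List Char) (m : Nat) (h : s.length ≤ m) :
    callFollows fb s m = false := by
  cases fb with
  | zero => rw [callFollows]
  | succ fb => rw [callFollows, dif_neg (by omega)]

-- B's word scan only moves forward
theorem scanWordEnd_ge (fb : Nat) (s : List Char) (k : Nat) : k ≤ scanWordEnd fb s k := by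
  match fb with
  | 0 => rw [scanWordEnd]
  | fb + 1 =>
    rw [scanWordEnd]
    split
    · split
      · have := scanWordEnd_ge fb s (k + 1)
        omega
      · omega
    · omega

-- B's word scan never leaves the string
theorem scanWordEnd_le (fb : Nat) (s : List Char) (k : Nat) (h : k ≤ s.length) :
    scanWordEnd fb s k ≤ s.length := by
  match fb with
  | 0 => rw [scanWordEnd]; omega
  | fb + 1 =>
    rw [scanWordEnd]
    split
    · split
      · exact scanWordEnd_le fb s (k + 1) (by omega)
      · omega
    · omega

-- at or past the end of the string the scan is stuck
theorem scanWordEnd_stuck (fb : Nat) (s : List Char) (k : Nat) (h : s.length ≤ k) :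
    scanWordEnd fb s k = k := by
  match fb with
  | 0 => rw [scanWordEnd]
  | fb + 1 =>
    rw [scanWordEnd]
    rw [dif_neg (by omega)]

-- where B's word scan stops (and the string goes on), the stopping char is not a word char
theorem scanWordEnd_stop (fb : Nat) (s : List Char) (k : Nat) (hb : s.length ≤ k + fb) :
    scanWordEnd fb s k < s.length → pvWordCharA (s.getD (scanWordEnd fb s k) ' ') = false := by
  intro h
  match fb with
  | 0 =>
    have h0 : scanWordEnd 0 s k = k := rfl
    rw [h0] at h
    omega
  | fb + 1 =>
    by_cases hk : k < s.length
    · by_cases hw : (PySem.Chars.isalnum (s[k]'hk) || s[k]'hk == '_') = true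
      · rw [scanWordEnd, dif_pos hk, if_pos hw] at h ⊢
        exact scanWordEnd_stop fb s (k + 1) (by omega) h
      · rw [scanWordEnd, dif_pos hk, if_neg hw] at h ⊢
        rw [List.getD_eq_getElem s ' ' hk]
        simpa [pvWordCharA] using hw
    · rw [scanWordEnd, dif_neg hk] at h
      omega

-- everything B's word scan passed over is a word character
theorem scanWordEnd_covers (fb : Nat) (s : List Char) (k : Nat) (hb : s.length ≤ k + fb) :
    ∀ m, k ≤ m → m < scanWordEnd fb s k → pvWordCharA (s.getD m ' ') = true := by
  intro m hm1 hm2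
  match fb with
  | 0 =>
    have h0 : scanWordEnd 0 s k = k := rfl
    rw [h0] at hm2
    omega
  | fb + 1 =>
    by_cases hk : k < s.length
    · by_cases hw : (PySem.Chars.isalnum (s[k]'hk) || s[k]'hk == '_') = true
      · rw [scanWordEnd, dif_pos hk, if_pos hw] at hm2
        rcases Nat.eq_or_lt_of_le hm1 with rfl | hlt
        · rw [List.getD_eq_getElem s ' ' hk]
          simpa [pvWordCharA] using hw
        · exact scanWordEnd_covers fb s (k + 1) (by omega) m (by omega) hm2
      · rw [scanWordEnd, dif_pos hk, if_neg hw] at hm2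
        omega
    · rw [scanWordEnd, dif_neg hk] at hm2
      omega

-- if everything from k on is a word character, B's scan runs to the end of the string
theorem scanWordEnd_of_all (fb : Nat) (s : List Char) (k : Nat) (hb : s.length ≤ k + fb)
    (hk : k ≤ s.length)
    (h : ∀ m, k ≤ m → m < s.length → pvWordCharA (s.getD m ' ') = true) :
    scanWordEnd fb s k = s.length := by
  match fb with
  | 0 =>
    have h0 : scanWordEnd 0 s k = k := rfl
    omega
  | fb + 1 =>
    by_cases hlt : k < s.length
    · have hw := h k (by omega) hlt
      rw [List.getD_eq_getElem s ' ' hlt] at hw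
      simp only [pvWordCharA] at hw
      rw [scanWordEnd, dif_pos hlt, if_pos hw]
      exact scanWordEnd_of_all fb s (k + 1) (by omega) (by omega) (fun m hm1 hm2 => h m (by omega) hm2)
    · rw [scanWordEnd, dif_neg hlt]
      omega

-- A's word-end loop on the suffix s[i:], expressed through B's absolute-index scan
theorem fwe_scan (s : List Char) (i st fa fb : Nat) (h : i + st < s.length)
    (ha : s.length - i ≤ st + fa) (hb : s.length ≤ i + st + fb) :
    findWordEndLoop fa (s.drop i) st =
      (if scanWordEnd fb s (i + st) < s.length then ((scanWordEnd fb s (i + st) : Int) - i)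
       else ((s.length : Int) - i - 1)) - 1 := by
  obtain ⟨fa', rfl⟩ : ∃ fa', fa = fa' + 1 := ⟨fa - 1, by omega⟩
  obtain ⟨fb', rfl⟩ : ∃ fb', fb = fb' + 1 := ⟨fb - 1, by omega⟩
  have hlt : st < (s.drop i).length := by simp only [List.length_drop]; omega
  rw [findWordEndLoop, dif_pos hlt, scanWordEnd, dif_pos h]
  have hgd : (s.drop i)[st]'hlt = s[i + st]'h := List.getElem_drop
  rw [hgd]
  by_cases hw : pvWordCharA (s[i + st]'h) = true
  · have hwB : (PySem.Chars.isalnum (s[i + st]'h) || s[i + st]'h == '_') = true := by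
      simpa [pvWordCharA] using hw
    have hwA : ¬ ((!pvWordCharA (s[i + st]'h)) = true) := by simp [hw]
    rw [if_neg hwA, if_pos hwB]
    by_cases h2 : st + 1 < (s.drop i).length
    · rw [if_pos h2,
        fwe_scan s i (st + 1) fa' fb' (by simp only [List.length_drop] at h2; omega)
          (by omega) (by omega)]
      have harg : i + (st + 1) = i + st + 1 := by omega
      rw [harg]
    · rw [if_neg h2]
      simp only [List.length_drop] at h2 hlt
      have hlen : i + st + 1 = s.length := by omega
      rw [scanWordEnd_stuck fb' s (i + st + 1) (by omega)]
      rw [if_neg (by omega)]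
      omega
  · simp only [Bool.not_eq_true] at hw
    have hwB : ¬ ((PySem.Chars.isalnum (s[i + st]'h) || s[i + st]'h == '_') = true) := by
      simp only [pvWordCharA] at hw
      simp [hw]
    have hwA : (!pvWordCharA (s[i + st]'h)) = true := by simp [pvWordCharA] at hw ⊢; simp [hw]
    rw [if_pos hwA, if_neg hwB, if_pos h]
    omega

-- A's has_function_call_after on the suffix s[i:] is B's _call_follows at the absolute index
theorem hasCall_callFollows (s : List Char) (i q fa fb : Nat)
    (ha : s.length - i ≤ q + fa) (hb : s.length ≤ i + q + fb) :
    hasFunctionCallAfter fa (s.drop i) q = callFollows fb s (i + q) := by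
  by_cases h : i + q < s.length
  · obtain ⟨fa', rfl⟩ : ∃ fa', fa = fa' + 1 := ⟨fa - 1, by omega⟩
    obtain ⟨fb', rfl⟩ : ∃ fb', fb = fb' + 1 := ⟨fb - 1, by omega⟩
    rw [hasFunctionCallAfter, callFollows]
    rw [dif_pos (show q < (s.drop i).length by simp only [List.length_drop]; omega), dif_pos h]
    simp only [List.getElem_drop]
    by_cases h1 : (s[i + q]'h == '.' || s[i + q]'h == '(') = true
    · rw [if_pos h1, if_pos h1]
    · rw [if_neg h1, if_neg h1]
      by_cases h2 : (s[i + q]'h == ' ' || s[i + q]'h == '\t' || s[i + q]'h == '\n') = true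
      · rw [if_pos h2, if_neg (by simp [h2])]
        rw [hasCall_callFollows s i (q + 1) fa' fb' (by omega) (by omega)]
        have harg : i + (q + 1) = i + q + 1 := by omega
        rw [harg]
      · rw [if_neg h2, if_pos (by simp only [Bool.not_eq_true] at h2; simp [h2])]
  · have hA : hasFunctionCallAfter fa (s.drop i) q = false := by
      match fa with
      | 0 => rw [hasFunctionCallAfter]
      | fa + 1 =>
        rw [hasFunctionCallAfter,
          dif_neg (show ¬ q < (s.drop i).length by simp only [List.length_drop]; omega)]
    have hB : callFollows fb s (i + q) = false := by
      match fb with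
      | 0 => rw [callFollows]
      | fb + 1 => rw [callFollows, dif_neg (by omega)]
    rw [hA, hB]

-- the first "this." occurrence at or after an invariant pointer position is really scanned
theorem first_occ_reached (s : List Char) (i j : Nat)
    (hij : i ≤ j) (hlt0 : i = 0 ∨ i < j) (hjocc : pvPat <+: s.drop j)
    (hmin : ∀ m, i ≤ m → m < j → ¬ pvPat <+: s.drop m)
    (hInv : pvInv s i) : pvReached s j = true := by
  rw [pvReached_true_iff]
  intro q hq hglue
  have hg := hglue
  simp only [pvGlue, Bool.and_eq_true, decide_eq_true_eq, Bool.not_eq_true'] at hg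
  obtain ⟨⟨hqocc, hqall⟩, hqalpha⟩ := hg
  have hq5 : q + 5 ≤ j := occ_spacing s q j hqocc hjocc (by omega)
  by_contra hqre
  rw [Bool.not_eq_false] at hqre
  have hqi : q < i := by
    by_contra hge
    exact hmin q (by omega) hq hqocc
  rcases hlt0 with rfl | hilt
  · omega
  have hjlen : j + 5 ≤ s.length := occ_len s j hjocc
  unfold pvInv at hInv
  rcases hInv with rfl | rfl | ⟨hin, hwc, himp⟩ | ⟨hi5, hocc5, halpha5⟩
  · omega
  · omega
  · rcases Nat.lt_or_ge i (q + 5) with hq5i | hq5i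
    · -- q straddles i: s[i] is inside q's "this."
      have hd : 1 ≤ i - q ∧ i - q ≤ 4 := by omega
      have hch := occ_char s q (i - q) hqocc (by omega)
      rw [show q + (i - q) = i by omega] at hch
      have hcase : i - q = 1 ∨ i - q = 2 ∨ i - q = 3 ∨ i - q = 4 := by omega
      rcases hcase with hc4 | hc4 | hc4 | hc4 <;> rw [hc4] at hch
      · rw [hch] at hwc
        exact absurd hwc (by decide)
      · rw [hch] at hwc
        exact absurd hwc (by decide)
      · rw [hch] at hwc
        exact absurd hwc (by decide)
      · have := himp ⟨by omega, by rw [show i - 4 = q by omega]; exact hqocc⟩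
        rw [show i - 4 = q by omega] at this
        rw [this] at hqre
        exact absurd hqre (by decide)
    · -- q's word run would cover the stopping character s[i]
      have hword := all_take_drop_elim s (q + 5) j pvIdentChar hqall i hq5i hilt (by omega)
      rw [pvIdentChar_eq] at hword
      rw [hword] at hwc
      exact absurd hwc (by decide)
  · rcases lt_trichotomy q (i - 5) with hlt5 | heq5 | hgt5
    · have hsp := occ_spacing s q (i - 5) hqocc hocc5 hlt5
      have hdot := occ_char s (i - 5) 4 hocc5 (by omega)
      rw [show i - 5 + 4 = i - 1 by omega] at hdot
      have hword := all_take_drop_elim s (q + 5) j pvIdentChar hqall (i - 1)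
        (by omega) (by omega) (by omega)
      rw [pvIdentChar_eq, hdot] at hword
      exact absurd hword (by decide)
    · rw [← heq5] at halpha5
      rw [halpha5] at hqalpha
      exact absurd hqalpha (by decide)
    · have hsp := occ_spacing s (i - 5) q hocc5 hqocc hgt5
      omega

theorem better_binds_main (s : List Char) (fl : List (List Char))
    (hP1 : ¬ (pvPat <:+ s ∧ (s.length = 5 ∨ pvAlphaU (s.getD (s.length - 6) ' ') = false)))
    (hP2 : ¬ pvPat2 <:+: s)
    (hD : ¬ ∃ p < s.length, pvPat <+: s.drop p ∧
        s.drop (p + 5) ≠ [] ∧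
        (s.drop (p + 5)).all pvIdentChar = true ∧
        pvAlphaU (pvPrevOf s p) = false ∧
        pvReached s p = true ∧
        (s.drop (p + 5) ∈ fl ∨ (s.drop (p + 5)).dropLast ∈ fl)) :
    ∀ (i : Nat) (res : List Char) (fa fb : Nat), i ≤ s.length →
      s.length + 1 - i ≤ fa → s.length + 1 - i ≤ fb →
      pvInv s i →
      betterBindsLoop fa fl (s.drop i) res = bbAltLoop fb s (PySem.Set.ofList fl) i res
  | i, res, fa, fb, hi, hfa, hfb, hInv => by
    obtain ⟨fa', rfl⟩ : ∃ fa', fa = fa' + 1 := ⟨fa - 1, by omega⟩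
    obtain ⟨fb', rfl⟩ : ∃ fb', fb = fb' + 1 := ⟨fb - 1, by omega⟩
    rw [betterBindsLoop, bbAltLoop]
    simp only []
    rw [PySem.Chars.findFrom_natCast s pvPat i hi]
    by_cases hfind : PySem.Chars.find (s.drop i) pvPat = -1
    · rw [if_pos hfind, if_pos rfl]
      by_cases hnil : s.drop i = []
      · rw [if_pos hnil, hnil, List.append_nil]
      · rw [if_neg hnil, if_neg (by simp [hfind])]
    · obtain ⟨th, hth⟩ : ∃ th : Nat, PySem.Chars.find (s.drop i) pvPat = (th : Int) :=
        ⟨(PySem.Chars.find (s.drop i) pvPat).toNat, by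
          have := PySem.Chars.neg_one_le_find (s.drop i) pvPat; omega⟩
      rw [hth] at hfind ⊢
      have hspec := PySem.Chars.find_spec (s := s.drop i) (sub := pvPat) (by rw [hth]; omega)
      rw [hth] at hspec
      have hpre5 : pvPat <+: s.drop (i + th) := by
        have := hspec.1
        rwa [Int.toNat_natCast, List.drop_drop] at this
      have hlen5 : i + th + 5 ≤ s.length := by
        have := hpre5.length_le
        simp only [List.length_drop] at this
        have h5 : pvPat.length = 5 := rfl
        omega
      -- a match immediately at a resumption point i > 0 would mean "this.this." in s
      have hnotbd : ¬ (th = 0 ∧ 0 < i) := by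
        rintro ⟨rfl, hipos⟩
        unfold pvInv at hInv
        rcases hInv with h1 | h1 | h1 | h1
        · omega
        · omega
        · have hts : s.getD i ' ' = 't' := by
            obtain ⟨t, ht⟩ := hpre5
            rw [Nat.add_zero] at ht
            have hg : s[i]? = some 't' := by
              have hgd : (List.drop i s)[0]? = s[i + 0]? := List.getElem?_drop
              rw [Nat.add_zero] at hgd
              rw [← hgd, ← ht]
              rfl
            rw [List.getD_eq_getElem?_getD, hg]
            rfl
          rcases h1 with ⟨_, hwc, _⟩
          rw [hts] at hwc
          exact absurd hwc (by decide)
        · have hpp : pvPat2 <+: s.drop (i - 5) := by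
            obtain ⟨t, ht⟩ := h1.2.1
            obtain ⟨u, hu⟩ := hpre5
            rw [Nat.add_zero] at hu
            have htd : t = s.drop i := by
              have h5d : List.drop 5 (s.drop (i - 5)) = s.drop i := by
                rw [List.drop_drop]; congr 1; omega
              rw [← h5d, ← ht]
              simp [pvPat]
            refine ⟨u, ?_⟩
            rw [← ht, htd, ← hu]
            simp [pvPat2]
          exact hP2 (hpp.isInfix.trans (List.drop_suffix (i - 5) s).isInfix)
      rw [if_neg hfind, if_neg (show ¬ ((i : Int) + (th : Int) = -1) by omega)]
      rw [if_neg (show ¬ (s.drop i = []) by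
        intro hc
        have := congrArg List.length hc
        simp only [List.length_drop, List.length_nil] at this
        omega)]
      rw [if_pos (show ((th : Int) ≠ -1) by omega)]
      have hjth : ((i : Int) + (th : Int)).toNat = i + th := by omega
      rw [hjth]
      -- the preceding characters A and B test are the same character
      have hprev : (PySem.List.pyGet? (s.drop i) ((th : Int) - 1)).getD ' ' =
          (PySem.List.pyGet? s (((i + th : Nat) : Int) - 1)).getD ' ' := by
        rcases Nat.eq_zero_or_pos th with h0 | h0
        · have hi0 : i = 0 := by
            by_contra hne
            exact hnotbd ⟨h0, by omega⟩
          subst h0; subst hi0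
          norm_num
        · rw [show (th : Int) - 1 = ((th - 1 : Nat) : Int) by omega,
            show ((i + th : Nat) : Int) - 1 = ((i + th - 1 : Nat) : Int) by omega]
          rw [PySem.List.pyGet?_natCast, PySem.List.pyGet?_natCast, List.getElem?_drop,
            show i + (th - 1) = i + th - 1 by omega]
      rw [hprev]
      set c := (PySem.List.pyGet? s (((i + th : Nat) : Int) - 1)).getD ' ' with hc
      have hcPrev : c = pvPrevOf s (i + th) := by
        unfold pvPrevOf
        rcases Nat.eq_zero_or_pos (i + th) with h0 | h0
        · rw [if_pos h0, hc, h0]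
          simp only [Nat.cast_zero, zero_sub]
          rw [PySem.List.pyGet?_neg_one, List.getLast?_eq_getElem?, List.getD_eq_getElem?_getD]
        · rw [if_neg (by omega), hc,
            show (((i + th : Nat) : Int) - 1) = ((i + th - 1 : Nat) : Int) by omega,
            PySem.List.pyGet?_natCast, List.getD_eq_getElem?_getD]
      have hmin : ∀ m, i ≤ m → m < i + th → ¬ pvPat <+: s.drop m := by
        intro m hm1 hm2 hcon
        have hsp := hspec.2 (m - i) (by rw [Int.toNat_natCast]; omega)
        rw [List.drop_drop, show i + (m - i) = m by omega] at hsp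
        exact hsp hcon
      by_cases hch : (PySem.Chars.isalpha c || c == '_') = true
      · -- skip branch: the char before "this." is a letter or '_'
        rw [if_neg (show ¬ ((!(PySem.Chars.isalpha c || c == '_')) = true) by simp [hch]),
          if_pos hch]
        rw [show ((th : Int) + 5) = ((th + 5 : Nat) : Int) by push_cast; ring]
        rw [PySem.List.slice_from_natCast, List.drop_drop]
        rw [PySem.List.slice_zero_start, PySem.List.slice_to_natCast]
        have halpha' : pvAlphaU (pvPrevOf s (i + th)) = true := by
          rw [pvAlphaU_eq, ← hcPrev]
          exact hch
        have hInv' : pvInv s (i + th + 5) := by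
          rcases Nat.lt_or_ge (i + th + 5) s.length with hlt | hge
          · refine Or.inr (Or.inr (Or.inr ⟨by omega, ?_, ?_⟩)) <;>
              rw [show i + th + 5 - 5 = i + th by omega]
            · exact hpre5
            · exact halpha'
          · exact Or.inr (Or.inl (by omega))
        have htake : (s.drop i).take (th + 5) = (s.drop i).take (i + th + 5 - i) := by
          congr 1; omega
        rw [htake]
        exact better_binds_main s fl hP1 hP2 hD (i + th + 5)
          (res ++ (s.drop i).take (i + th + 5 - i)) fa' fb'
          (by omega) (by omega) (by omega) hInv'
      · have hchf : (PySem.Chars.isalpha c || c == '_') = false := by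
          rwa [Bool.not_eq_true] at hch
        rw [if_pos (show (!(PySem.Chars.isalpha c || c == '_')) = true by simp [hchf]),
          if_neg (show ¬ ((PySem.Chars.isalpha c || c == '_') = true) by simp [hchf])]
        rw [show ((th : Int) + 5).toNat = th + 5 by omega]
        have halphaPrev : pvAlphaU (pvPrevOf s (i + th)) = false := by
          rw [pvAlphaU_eq, ← hcPrev]
          exact hchf
        have hreJ : pvReached s (i + th) = true :=
          first_occ_reached s i (i + th) (by omega)
            (by rcases Nat.eq_zero_or_pos th with h0 | h0
                · left
                  by_contra hne
                  exact hnotbd ⟨h0, by omega⟩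
                · right; omega)
            hpre5 hmin hInv
        -- the word scan cannot start past the end: that is A's TypeError, excluded by Pre_
        have hlt : i + th + 5 < s.length := by
          rcases Nat.lt_or_ge (i + th + 5) s.length with hlt | hge
          · exact hlt
          · exfalso
            have hend : i + th + 5 = s.length := by omega
            have hsufeq : s.drop (i + th) = pvPat := by
              refine (hpre5.eq_of_length ?_).symm
              simp only [List.length_drop]
              have h5 : pvPat.length = 5 := rfl
              omega
            have hsuf : pvPat <:+ s := by
              rw [← hsufeq]
              exact List.drop_suffix _ _
            apply hP1
            refine ⟨hsuf, ?_⟩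
            rcases Nat.eq_zero_or_pos th with h0 | h0
            · have hi0 : i = 0 := by
                by_contra hne
                exact hnotbd ⟨h0, by omega⟩
              subst h0; subst hi0
              left
              simpa using hend.symm
            · right
              have hceq : c = s.getD (s.length - 6) ' ' := by
                rw [hc, show (((i + th : Nat) : Int) - 1) = ((i + th - 1 : Nat) : Int) by omega,
                  PySem.List.pyGet?_natCast, List.getD_eq_getElem?_getD,
                  show s.length - 6 = i + th - 1 by omega]
              rw [pvAlphaU_eq, ← hceq]
              exact hchf
        have hwe : findWordEndAfter (s.drop i) (th + 5) =
            some (findWordEndLoop (s.drop i).length (s.drop i) (th + 5)) := by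
          unfold findWordEndAfter
          rw [if_pos (by simp only [List.length_drop]; omega)]
        rw [hwe]
        have hkge := scanWordEnd_ge s.length s (i + th + 5)
        have hkle := scanWordEnd_le s.length s (i + th + 5) (by omega)
        have hfs := fwe_scan s i (th + 5) (s.drop i).length s.length (by omega)
          (by simp only [List.length_drop]; omega) (by omega)
        rw [show i + (th + 5) = i + th + 5 by omega] at hfs
        set k : Nat := scanWordEnd s.length s (i + th + 5) with hkdef
        by_cases hk : k < s.length
        · -- the word ends inside the string: A and B cut at the same place
          have hEq : findWordEndLoop (s.drop i).length (s.drop i) (th + 5) = ((k - i : Nat) : Int) - 1 := by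
            rw [hfs, if_pos hk]
            omega
          rw [hEq]
          simp only []
          rw [show ((th : Int) + 5) = ((th + 5 : Nat) : Int) by push_cast; ring]
          rw [show ((k - i : Nat) : Int) - 1 + 1 = ((k - i : Nat) : Int) by ring]
          rw [PySem.List.slice_natCast, PySem.List.slice_zero_start, PySem.List.slice_to_natCast,
            PySem.List.slice_from_natCast]
          simp only [List.drop_drop, Int.toNat_natCast]
          rw [hasCall_callFollows s i (k - i) (s.drop i).length s.length
            (by simp only [List.length_drop]; omega) (by omega)]
          rw [show i + (k - i) = k by omega,
            show i + (th + 5) = i + th + 5 by omega,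
            show k - i - (th + 5) = k - (i + th + 5) by omega]
          have hInv' : pvInv s k := by
            refine Or.inr (Or.inr (Or.inl
              ⟨hk, scanWordEnd_stop s.length s (i + th + 5) (by omega) hk, ?_⟩))
            rintro ⟨hk4, hocc4⟩
            have hsp : (i + th) + 5 ≤ k - 4 :=
              occ_spacing s (i + th) (k - 4) hpre5 hocc4 (by omega)
            apply pvReached_false_intro s (k - 4) (i + th) (by omega) ?_ hreJ
            simp only [pvGlue, Bool.and_eq_true, decide_eq_true_eq, Bool.not_eq_true']
            refine ⟨⟨hpre5, ?_⟩, halphaPrev⟩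
            apply all_take_drop_intro s (i + th + 5) (k - 4) pvIdentChar (by omega)
            intro mm hm1 hm2
            rw [pvIdentChar_eq]
            exact scanWordEnd_covers s.length s (i + th + 5) (by omega) mm hm1
              (by rw [← hkdef]; omega)
          have hcont : ((PySem.Set.ofList fl).contains
              ((s.drop (i + th + 5)).take (k - (i + th + 5))) = true) ↔
              ((s.drop (i + th + 5)).take (k - (i + th + 5))) ∈ fl := by
            simp only [PySem.Set.contains_eq_listContains, List.contains_eq_mem,
              PySem.Set.mem_ofList, decide_eq_true_eq]
          by_cases hmem : ((s.drop (i + th + 5)).take (k - (i + th + 5))) ∈ fl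
          · rw [if_pos hmem]
            by_cases hcf : callFollows s.length s k = true
            · rw [if_neg (show ¬ ((!callFollows s.length s k) = true) by simp [hcf]),
                if_neg (show ¬ (((PySem.Set.ofList fl).contains _ &&
                    !callFollows s.length s k) = true) by simp [hcf])]
              exact better_binds_main s fl hP1 hP2 hD k _ fa' fb'
                (by omega) (by omega) (by omega) hInv'
            · rw [if_pos (show (!callFollows s.length s k) = true by
                    simp only [Bool.not_eq_true] at hcf
                    simp [hcf]),
                if_pos (show (((PySem.Set.ofList fl).contains _ &&
                    !callFollows s.length s k) = true) by
                  simp only [Bool.and_eq_true]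
                  exact ⟨hcont.mpr hmem, by simp [hcf]⟩)]
              exact better_binds_main s fl hP1 hP2 hD k _ fa' fb'
                (by omega) (by omega) (by omega) hInv'
          · rw [if_neg hmem,
              if_neg (show ¬ (((PySem.Set.ofList fl).contains _ &&
                  !callFollows s.length s k) = true) by
                simp only [Bool.and_eq_true, not_and]
                intro hc'
                exact absurd (hcont.mp hc') hmem)]
            exact better_binds_main s fl hP1 hP2 hD k _ fa' fb'
              (by omega) (by omega) (by omega) hInv'
        · -- the word runs to the end of the string; outside D_ neither name is in the
          -- function list, so A (which cuts one char early) and B both copy the rest verbatim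
          have hkn : k = s.length := by omega
          have hall : (s.drop (i + th + 5)).all pvIdentChar = true := by
            rw [List.all_eq_true]
            intro x hx
            obtain ⟨m, hm, hxeq⟩ := List.mem_iff_getElem.mp hx
            have hm' : i + th + 5 + m < s.length := by
              simp only [List.length_drop] at hm; omega
            have hwc := scanWordEnd_covers s.length s (i + th + 5) (by omega)
              (i + th + 5 + m) (by omega) (by rw [← hkdef, hkn]; omega)
            rw [List.getD_eq_getElem s ' ' hm'] at hwc
            rw [← hxeq]
            have hgd : (s.drop (i + th + 5))[m]'hm = s[i + th + 5 + m]'hm' := List.getElem_drop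
            rw [hgd, pvIdentChar_eq]
            exact hwc
          have hnomem : ¬ (s.drop (i + th + 5) ∈ fl ∨ (s.drop (i + th + 5)).dropLast ∈ fl) := by
            intro hmem
            refine hD ⟨i + th, by omega, hpre5, ?_, hall, halphaPrev, hreJ, hmem⟩
            intro hnil
            have := congrArg List.length hnil
            simp only [List.length_drop, List.length_nil] at this
            omega
          have hEq : findWordEndLoop (s.drop i).length (s.drop i) (th + 5)
              = ((s.length - i - 1 : Nat) : Int) - 1 := by
            rw [hfs, if_neg hk]
            omega
          rw [hEq]
          simp only []
          rw [show ((th : Int) + 5) = ((th + 5 : Nat) : Int) by push_cast; ring]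
          rw [show ((s.length - i - 1 : Nat) : Int) - 1 + 1 = ((s.length - i - 1 : Nat) : Int) by
            ring]
          rw [PySem.List.slice_natCast, PySem.List.slice_zero_start, PySem.List.slice_to_natCast,
            PySem.List.slice_from_natCast]
          simp only [List.drop_drop]
          rw [show i + (th + 5) = i + th + 5 by omega]
          have hwrdA : (s.drop (i + th + 5)).take (s.length - i - 1 - (th + 5))
              = (s.drop (i + th + 5)).dropLast := by
            rw [List.dropLast_eq_take]
            congr 1
            simp only [List.length_drop]
            omega
          rw [hwrdA]
          rw [if_neg (fun hmem => hnomem (Or.inr hmem))]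
          have hwrdB : (s.drop (i + th + 5)).take (k - (i + th + 5)) = s.drop (i + th + 5) := by
            rw [hkn, show s.length - (i + th + 5) = (s.drop (i + th + 5)).length by
              simp only [List.length_drop]]
            exact List.take_length
          rw [hwrdB]
          rw [if_neg (show ¬ (((PySem.Set.ofList fl).contains (s.drop (i + th + 5)) &&
              !callFollows s.length s k) = true) by
            intro hAnd
            simp only [Bool.and_eq_true] at hAnd
            have hco := hAnd.1
            simp only [PySem.Set.contains_eq_listContains, List.contains_eq_mem,
              PySem.Set.mem_ofList, decide_eq_true_eq] at hco
            exact hnomem (Or.inl hco))]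
          -- one more iteration on each side: a single char (A) / an empty suffix (B) has no match
          obtain ⟨fa'', rfl⟩ : ∃ fa'', fa' = fa'' + 1 := ⟨fa' - 1, by omega⟩
          obtain ⟨fb'', rfl⟩ : ∃ fb'', fb' = fb'' + 1 := ⟨fb' - 1, by omega⟩
          rw [betterBindsLoop, bbAltLoop]
          simp only []
          have hd1 : s.drop (i + (s.length - i - 1)) = s.drop (s.length - 1) := by
            congr 1; omega
          rw [hd1]
          have hlen1 : (s.drop (s.length - 1)).length = 1 := by
            simp only [List.length_drop]; omega
          rw [if_neg (show ¬ s.drop (s.length - 1) = [] by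
            intro hcon; rw [hcon] at hlen1; simp at hlen1)]
          have h5 : pvPat.length = 5 := rfl
          have hf1 : PySem.Chars.find (s.drop (s.length - 1)) pvPat = -1 := by
            rw [PySem.Chars.find_eq_neg_one_iff]
            intro hinf
            have hle := hinf.length_le
            rw [h5, hlen1] at hle
            omega
          rw [hf1]
          rw [if_neg (show ¬ ((-1 : Int) ≠ -1) by simp)]
          rw [hkn]
          rw [PySem.Chars.findFrom_natCast s pvPat s.length le_rfl]
          rw [List.drop_length]
          have hf2 : PySem.Chars.find ([] : List Char) pvPat = -1 := by
            rw [PySem.Chars.find_eq_neg_one_iff]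
            intro hinf
            have hle := hinf.length_le
            rw [h5] at hle
            simp only [List.length_nil] at hle
            omega
          rw [hf2]
          rw [if_pos rfl]
          rw [List.append_nil]
          have htakeB : (s.drop i).take (s.length - i) = s.drop i := by
            rw [show s.length - i = (s.drop i).length by simp only [List.length_drop]]
            exact List.take_length
          rw [htakeB]
          have hd2 : s.drop (s.length - 1) = (s.drop i).drop (s.length - i - 1) := by
            rw [List.drop_drop]; congr 1; omega
          rw [hd2, List.append_assoc, List.take_append_drop]
          rw [if_pos rfl]
termination_by i _ _ _ _ _ _ _ => s.length - i

-- one final iteration of each loop when nothing can match any more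
theorem bbA_done (fa : Nat) (fl : List (List Char)) (s res : List Char)
    (h1 : (s.drop (s.length - 1)).length = 1) :
    betterBindsLoop (fa + 1) fl (s.drop (s.length - 1)) res = res ++ s.drop (s.length - 1) := by
  rw [betterBindsLoop]
  simp only []
  rw [if_neg (show ¬ s.drop (s.length - 1) = [] by
    intro hcon; rw [hcon] at h1; simp at h1)]
  have hf1 : PySem.Chars.find (s.drop (s.length - 1)) pvPat = -1 := by
    rw [PySem.Chars.find_eq_neg_one_iff]
    intro hinf
    have hle := hinf.length_le
    have h5 : pvPat.length = 5 := rfl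
    rw [h5, h1] at hle
    omega
  rw [hf1, if_neg (show ¬ ((-1 : Int) ≠ -1) by simp)]

theorem bbAlt_done (fb : Nat) (s : List Char) (funcs : PySem.Set (List Char)) (out : List Char) :
    bbAltLoop (fb + 1) s funcs s.length out = out := by
  rw [bbAltLoop]
  simp only []
  rw [PySem.Chars.findFrom_natCast s pvPat s.length le_rfl, List.drop_length]
  have hf2 : PySem.Chars.find ([] : List Char) pvPat = -1 := by
    rw [PySem.Chars.find_eq_neg_one_iff]
    intro hinf
    have hle := hinf.length_le
    have h5 : pvPat.length = 5 := rfl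
    rw [h5] at hle
    simp only [List.length_nil] at hle
    omega
  rw [hf2, if_pos rfl, if_pos rfl, List.append_nil]

-- inside D_ the scanner really processes the final occurrence, A truncates the word and B does
-- not, and the two outputs provably differ
theorem exact_main (s : List Char) (fl : List (List Char))
    (hP2 : ¬ pvPat2 <:+: s)
    (p : Nat) (hpocc : pvPat <+: s.drop p)
    (hWne : s.drop (p + 5) ≠ []) (hWall : (s.drop (p + 5)).all pvIdentChar = true)
    (hpprev : pvAlphaU (pvPrevOf s p) = false) (hpre : pvReached s p = true)
    (hmem : s.drop (p + 5) ∈ fl ∨ (s.drop (p + 5)).dropLast ∈ fl) :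
    ∀ (i : Nat) (res : List Char) (fa fb : Nat), i ≤ p →
      s.length + 1 - i ≤ fa → s.length + 1 - i ≤ fb →
      pvInv s i →
      betterBindsLoop fa fl (s.drop i) res ≠ bbAltLoop fb s (PySem.Set.ofList fl) i res
  | i, res, fa, fb, hip, hfa, hfb, hInv => by
    have hp5lt : p + 5 < s.length := by
      have hlen := occ_len s p hpocc
      rcases Nat.lt_or_ge (p + 5) s.length with h | h
      · exact h
      · exfalso
        apply hWne
        apply List.eq_nil_of_length_eq_zero
        simp only [List.length_drop]
        omega
    obtain ⟨fa', rfl⟩ : ∃ fa', fa = fa' + 1 := ⟨fa - 1, by omega⟩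
    obtain ⟨fb', rfl⟩ : ∃ fb', fb = fb' + 1 := ⟨fb - 1, by omega⟩
    rw [betterBindsLoop, bbAltLoop]
    simp only []
    rw [PySem.Chars.findFrom_natCast s pvPat i (by omega)]
    have hfind : PySem.Chars.find (s.drop i) pvPat ≠ -1 := by
      rw [Ne, PySem.Chars.find_eq_neg_one_iff]
      intro hcon
      apply hcon
      have h1 : pvPat <+: List.drop (p - i) (s.drop i) := by
        rw [List.drop_drop, show i + (p - i) = p by omega]
        exact hpocc
      exact h1.isInfix.trans (List.drop_suffix (p - i) (s.drop i)).isInfix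
    obtain ⟨th, hth⟩ : ∃ th : Nat, PySem.Chars.find (s.drop i) pvPat = (th : Int) :=
      ⟨(PySem.Chars.find (s.drop i) pvPat).toNat, by
        have := PySem.Chars.neg_one_le_find (s.drop i) pvPat; omega⟩
    rw [hth] at hfind ⊢
    have hspec := PySem.Chars.find_spec (s := s.drop i) (sub := pvPat) (by rw [hth]; omega)
    rw [hth] at hspec
    have hpre5 : pvPat <+: s.drop (i + th) := by
      have := hspec.1
      rwa [Int.toNat_natCast, List.drop_drop] at this
    have hmin : ∀ m, i ≤ m → m < i + th → ¬ pvPat <+: s.drop m := by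
      intro m hm1 hm2 hcon
      have hsp := hspec.2 (m - i) (by rw [Int.toNat_natCast]; omega)
      rw [List.drop_drop, show i + (m - i) = m by omega] at hsp
      exact hsp hcon
    have hjp : i + th ≤ p := by
      by_contra hgt
      have := hspec.2 (p - i) (by rw [Int.toNat_natCast]; omega)
      rw [List.drop_drop, show i + (p - i) = p by omega] at this
      exact this hpocc
    have hlen5 : i + th + 5 ≤ s.length := by omega
    have hnotbd : ¬ (th = 0 ∧ 0 < i) := by
      rintro ⟨rfl, hipos⟩
      unfold pvInv at hInv
      rcases hInv with h1 | h1 | h1 | h1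
      · omega
      · omega
      · have hts : s.getD i ' ' = 't' := by
          have := occ_char s (i + 0) 0 hpre5 (by omega)
          simpa using this
        rcases h1 with ⟨_, hwc, _⟩
        rw [hts] at hwc
        exact absurd hwc (by decide)
      · have hpp : pvPat2 <+: s.drop (i - 5) := by
          obtain ⟨t, ht⟩ := h1.2.1
          obtain ⟨u, hu⟩ := hpre5
          rw [Nat.add_zero] at hu
          have htd : t = s.drop i := by
            have h5d : List.drop 5 (s.drop (i - 5)) = s.drop i := by
              rw [List.drop_drop]; congr 1; omega
            rw [← h5d, ← ht]
            simp [pvPat]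
          refine ⟨u, ?_⟩
          rw [← ht, htd, ← hu]
          simp [pvPat2]
        exact hP2 (hpp.isInfix.trans (List.drop_suffix (i - 5) s).isInfix)
    rw [if_neg hfind, if_neg (show ¬ ((i : Int) + (th : Int) = -1) by omega)]
    rw [if_neg (show ¬ (s.drop i = []) by
      intro hc
      have := congrArg List.length hc
      simp only [List.length_drop, List.length_nil] at this
      omega)]
    rw [if_pos (show ((th : Int) ≠ -1) by omega)]
    have hjth : ((i : Int) + (th : Int)).toNat = i + th := by omega
    rw [hjth]
    have hprev : (PySem.List.pyGet? (s.drop i) ((th : Int) - 1)).getD ' ' =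
        (PySem.List.pyGet? s (((i + th : Nat) : Int) - 1)).getD ' ' := by
      rcases Nat.eq_zero_or_pos th with h0 | h0
      · have hi0 : i = 0 := by
          by_contra hne
          exact hnotbd ⟨h0, by omega⟩
        subst h0; subst hi0
        norm_num
      · rw [show (th : Int) - 1 = ((th - 1 : Nat) : Int) by omega,
          show ((i + th : Nat) : Int) - 1 = ((i + th - 1 : Nat) : Int) by omega]
        rw [PySem.List.pyGet?_natCast, PySem.List.pyGet?_natCast, List.getElem?_drop,
          show i + (th - 1) = i + th - 1 by omega]
    rw [hprev]
    set c := (PySem.List.pyGet? s (((i + th : Nat) : Int) - 1)).getD ' ' with hc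
    have hcPrev : c = pvPrevOf s (i + th) := by
      unfold pvPrevOf
      rcases Nat.eq_zero_or_pos (i + th) with h0 | h0
      · rw [if_pos h0, hc, h0]
        simp only [Nat.cast_zero, zero_sub]
        rw [PySem.List.pyGet?_neg_one, List.getLast?_eq_getElem?, List.getD_eq_getElem?_getD]
      · rw [if_neg (by omega), hc,
          show (((i + th : Nat) : Int) - 1) = ((i + th - 1 : Nat) : Int) by omega,
          PySem.List.pyGet?_natCast, List.getD_eq_getElem?_getD]
    by_cases hch : (PySem.Chars.isalpha c || c == '_') = true
    · -- skip branch; the final occurrence itself is never skipped (its prev char test fails)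
      rw [if_neg (show ¬ ((!(PySem.Chars.isalpha c || c == '_')) = true) by simp [hch]),
        if_pos hch]
      have halpha' : pvAlphaU (pvPrevOf s (i + th)) = true := by
        rw [pvAlphaU_eq, ← hcPrev]
        exact hch
      have hjlt : i + th < p := by
        rcases Nat.eq_or_lt_of_le hjp with he | h
        · exfalso
          rw [he, hpprev] at halpha'
          exact absurd halpha' (by decide)
        · exact h
      have hle' : i + th + 5 ≤ p := occ_spacing s (i + th) p hpre5 hpocc hjlt
      rw [show ((th : Int) + 5) = ((th + 5 : Nat) : Int) by push_cast; ring]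
      rw [PySem.List.slice_from_natCast, List.drop_drop]
      rw [PySem.List.slice_zero_start, PySem.List.slice_to_natCast]
      have hInv' : pvInv s (i + th + 5) := by
        refine Or.inr (Or.inr (Or.inr ⟨by omega, ?_, ?_⟩)) <;>
          rw [show i + th + 5 - 5 = i + th by omega]
        · exact hpre5
        · exact halpha'
      have htake : (s.drop i).take (th + 5) = (s.drop i).take (i + th + 5 - i) := by
        congr 1; omega
      rw [htake]
      exact exact_main s fl hP2 p hpocc hWne hWall hpprev hpre hmem (i + th + 5)
        (res ++ (s.drop i).take (i + th + 5 - i)) fa' fb'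
        (by omega) (by omega) (by omega) hInv'
    · have hchf : (PySem.Chars.isalpha c || c == '_') = false := by
        rwa [Bool.not_eq_true] at hch
      rw [if_pos (show (!(PySem.Chars.isalpha c || c == '_')) = true by simp [hchf]),
        if_neg (show ¬ ((PySem.Chars.isalpha c || c == '_') = true) by simp [hchf])]
      rw [show ((th : Int) + 5).toNat = th + 5 by omega]
      have halphaPrev : pvAlphaU (pvPrevOf s (i + th)) = false := by
        rw [pvAlphaU_eq, ← hcPrev]
        exact hchf
      have hreJ : pvReached s (i + th) = true :=
        first_occ_reached s i (i + th) (by omega)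
          (by rcases Nat.eq_zero_or_pos th with h0 | h0
              · left
                by_contra hne
                exact hnotbd ⟨h0, by omega⟩
              · right; omega)
          hpre5 hmin hInv
      have hlt : i + th + 5 < s.length := by omega
      have hwe : findWordEndAfter (s.drop i) (th + 5) =
          some (findWordEndLoop (s.drop i).length (s.drop i) (th + 5)) := by
        unfold findWordEndAfter
        rw [if_pos (by simp only [List.length_drop]; omega)]
      rw [hwe]
      have hkge := scanWordEnd_ge s.length s (i + th + 5)
      have hkle := scanWordEnd_le s.length s (i + th + 5) (by omega)
      have hfs := fwe_scan s i (th + 5) (s.drop i).length s.length (by omega)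
        (by simp only [List.length_drop]; omega) (by omega)
      rw [show i + (th + 5) = i + th + 5 by omega] at hfs
      set k : Nat := scanWordEnd s.length s (i + th + 5) with hkdef
      by_cases hjp2 : i + th = p
      · -- THE final occurrence: the word runs to the end; A truncates it, B does not
        rw [← hjp2] at hWne hWall hmem hpprev hp5lt
        have hWall' : ((s.drop (i + th + 5)).take (s.length - (i + th + 5))).all
            pvIdentChar = true := by
          rw [show s.length - (i + th + 5) = (s.drop (i + th + 5)).length by
            simp only [List.length_drop], List.take_length]
          exact hWall
        have hkn : k = s.length := by
          rw [hkdef]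
          apply scanWordEnd_of_all s.length s (i + th + 5) (by omega) (by omega)
          intro mm hm1 hm2
          have := all_take_drop_elim s (i + th + 5) s.length pvIdentChar hWall' mm hm1 hm2 hm2
          rwa [pvIdentChar_eq] at this
        have hknot : ¬ k < s.length := by omega
        have hEq : findWordEndLoop (s.drop i).length (s.drop i) (th + 5)
            = ((s.length - i - 1 : Nat) : Int) - 1 := by
          rw [hfs, if_neg hknot]
          omega
        rw [hEq]
        simp only []
        rw [show ((th : Int) + 5) = ((th + 5 : Nat) : Int) by push_cast; ring]
        rw [show ((s.length - i - 1 : Nat) : Int) - 1 + 1 = ((s.length - i - 1 : Nat) : Int) by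
          ring]
        rw [PySem.List.slice_natCast, PySem.List.slice_zero_start, PySem.List.slice_to_natCast,
          PySem.List.slice_from_natCast]
        simp only [List.drop_drop, Int.toNat_natCast]
        rw [show i + (th + 5) = i + th + 5 by omega]
        have hwrdA : (s.drop (i + th + 5)).take (s.length - i - 1 - (th + 5))
            = (s.drop (i + th + 5)).dropLast := by
          rw [List.dropLast_eq_take]
          congr 1
          simp only [List.length_drop]
          omega
        rw [hwrdA]
        have hwrdB : (s.drop (i + th + 5)).take (k - (i + th + 5)) = s.drop (i + th + 5) := by
          rw [hkn, show s.length - (i + th + 5) = (s.drop (i + th + 5)).length by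
            simp only [List.length_drop]]
          exact List.take_length
        rw [hwrdB]
        have hlastw : pvWordCharA (s.getD (s.length - 1) ' ') = true := by
          have := all_take_drop_elim s (i + th + 5) s.length pvIdentChar hWall'
            (s.length - 1) (by omega) (by omega) (by omega)
          rwa [pvIdentChar_eq] at this
        have hcfA : callFollows s.length s (s.length - 1) = false := by
          have hl : s.length - 1 < s.length := by omega
          apply callFollows_word_at s.length s (s.length - 1) hl
          rwa [List.getD_eq_getElem s ' ' hl] at hlastw
        have hcfB : callFollows s.length s k = false := by
          rw [hkn]
          exact callFollows_stuck s.length s s.length (le_refl _)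
        rw [hasCall_callFollows s i (s.length - i - 1) (s.drop i).length s.length
          (by simp only [List.length_drop]; omega) (by omega)]
        rw [show i + (s.length - i - 1) = s.length - 1 by omega, hcfA]
        have hcont : ((PySem.Set.ofList fl).contains (s.drop (i + th + 5)) = true) ↔
            s.drop (i + th + 5) ∈ fl := by
          simp only [PySem.Set.contains_eq_listContains, List.contains_eq_mem,
            PySem.Set.mem_ofList, decide_eq_true_eq]
        obtain ⟨fa'', rfl⟩ : ∃ fa'', fa' = fa'' + 1 := ⟨fa' - 1, by omega⟩
        obtain ⟨fb'', rfl⟩ : ∃ fb'', fb' = fb'' + 1 := ⟨fb' - 1, by omega⟩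
        have hlen1 : (s.drop (s.length - 1)).length = 1 := by
          simp only [List.length_drop]; omega
        have htakeB : (s.drop i).take (s.length - i) = s.drop i := by
          rw [show s.length - i = (s.drop i).length by simp only [List.length_drop]]
          exact List.take_length
        have hlentk : ((s.drop i).take (s.length - i - 1)).length = s.length - i - 1 := by
          simp only [List.length_take, List.length_drop]
          omega
        have hbl : pvBind.length = 11 := rfl
        by_cases hmemA : (s.drop (i + th + 5)).dropLast ∈ fl
        · rw [if_pos hmemA, if_pos (by simp)]
          by_cases hmemB : s.drop (i + th + 5) ∈ fl
          · -- both names listed: same length, but they differ at one position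
            rw [if_pos (by simp only [Bool.and_eq_true]; exact ⟨hcont.mpr hmemB, by simp [hcfB]⟩)]
            rw [hkn, bbA_done fa'' fl s _ hlen1, bbAlt_done fb'' s _ _, htakeB]
            intro hEq2
            simp only [List.append_assoc] at hEq2
            have h2 := List.append_cancel_left hEq2
            have h3 := congrArg (fun l => l[s.length - i - 1]?) h2
            simp only [] at h3
            rw [List.getElem?_append_right (by rw [hlentk])] at h3
            rw [hlentk, Nat.sub_self] at h3
            have hbind0 : (pvBind ++ s.drop (s.length - 1))[0]? = some '.' := rfl
            rw [hbind0] at h3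
            rw [List.getElem?_append_left (show s.length - i - 1 < (List.drop i s).length by
              simp only [List.length_drop]; omega)] at h3
            have hgetl : (s.drop i)[s.length - i - 1]? = some (s.getD (s.length - 1) ' ') := by
              have hgd : (s.drop i)[s.length - i - 1]? = s[i + (s.length - i - 1)]? :=
                List.getElem?_drop
              rw [hgd, show i + (s.length - i - 1) = s.length - 1 by omega,
                List.getElem?_eq_getElem (by omega), List.getD_eq_getElem s ' ' (by omega)]
            rw [hgetl] at h3
            have hdot : s.getD (s.length - 1) ' ' = '.' := by
              have := h3
              simpa using this.symm
            rw [hdot] at hlastw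
            exact absurd hlastw (by decide)
          · -- only the truncated name is listed: A binds, B does not: lengths differ
            rw [if_neg (show ¬ (((PySem.Set.ofList fl).contains (s.drop (i + th + 5)) &&
                !callFollows s.length s k) = true) by
              simp only [Bool.and_eq_true, not_and]
              intro hc'
              exact absurd (hcont.mp hc') hmemB)]
            rw [hkn, bbA_done fa'' fl s _ hlen1, bbAlt_done fb'' s _ _, htakeB]
            intro hEq2
            have h3 := congrArg List.length hEq2
            simp only [List.length_append, hlentk, hlen1, hbl, List.length_drop] at h3
            omega
        · -- only the full name can be listed: B binds, A does not: lengths differ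
          have hmemB : s.drop (i + th + 5) ∈ fl := by
            rcases hmem with h | h
            · exact h
            · exact absurd h hmemA
          rw [if_neg hmemA]
          rw [if_pos (by simp only [Bool.and_eq_true]; exact ⟨hcont.mpr hmemB, by simp [hcfB]⟩)]
          rw [hkn, bbA_done fa'' fl s _ hlen1, bbAlt_done fb'' s _ _, htakeB]
          intro hEq2
          have h3 := congrArg List.length hEq2
          simp only [List.length_append, hlentk, hlen1, hbl, List.length_drop] at h3
          omega
      · -- an earlier occurrence: both programs cut at the same place before p
        have hjlt : i + th < p := by omega
        have hsp5 : i + th + 5 ≤ p := occ_spacing s (i + th) p hpre5 hpocc hjlt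
        have hksmall : k < p := by
          by_contra hge2
          rw [not_lt] at hge2
          have hglue : pvGlue s p (i + th) = true := by
            simp only [pvGlue, Bool.and_eq_true, decide_eq_true_eq, Bool.not_eq_true']
            refine ⟨⟨hpre5, ?_⟩, halphaPrev⟩
            apply all_take_drop_intro s (i + th + 5) p pvIdentChar (by omega)
            intro mm hm1 hm2
            rw [pvIdentChar_eq]
            exact scanWordEnd_covers s.length s (i + th + 5) (by omega) mm hm1
              (by rw [← hkdef]; omega)
          have hfalse := pvReached_false_intro s p (i + th) (by omega) hglue hreJ
          rw [hfalse] at hpre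
          exact absurd hpre (by decide)
        have hk : k < s.length := by omega
        have hEq : findWordEndLoop (s.drop i).length (s.drop i) (th + 5)
            = ((k - i : Nat) : Int) - 1 := by
          rw [hfs, if_pos hk]
          omega
        rw [hEq]
        simp only []
        rw [show ((th : Int) + 5) = ((th + 5 : Nat) : Int) by push_cast; ring]
        rw [show ((k - i : Nat) : Int) - 1 + 1 = ((k - i : Nat) : Int) by ring]
        rw [PySem.List.slice_natCast, PySem.List.slice_zero_start, PySem.List.slice_to_natCast,
          PySem.List.slice_from_natCast]
        simp only [List.drop_drop, Int.toNat_natCast]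
        rw [hasCall_callFollows s i (k - i) (s.drop i).length s.length
          (by simp only [List.length_drop]; omega) (by omega)]
        rw [show i + (k - i) = k by omega,
          show i + (th + 5) = i + th + 5 by omega,
          show k - i - (th + 5) = k - (i + th + 5) by omega]
        have hInv' : pvInv s k := by
          refine Or.inr (Or.inr (Or.inl
            ⟨hk, scanWordEnd_stop s.length s (i + th + 5) (by omega) hk, ?_⟩))
          rintro ⟨hk4, hocc4⟩
          have hsp : (i + th) + 5 ≤ k - 4 :=
            occ_spacing s (i + th) (k - 4) hpre5 hocc4 (by omega)
          apply pvReached_false_intro s (k - 4) (i + th) (by omega) ?_ hreJ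
          simp only [pvGlue, Bool.and_eq_true, decide_eq_true_eq, Bool.not_eq_true']
          refine ⟨⟨hpre5, ?_⟩, halphaPrev⟩
          apply all_take_drop_intro s (i + th + 5) (k - 4) pvIdentChar (by omega)
          intro mm hm1 hm2
          rw [pvIdentChar_eq]
          exact scanWordEnd_covers s.length s (i + th + 5) (by omega) mm hm1
            (by rw [← hkdef]; omega)
        have hcont : ((PySem.Set.ofList fl).contains
            ((s.drop (i + th + 5)).take (k - (i + th + 5))) = true) ↔
            ((s.drop (i + th + 5)).take (k - (i + th + 5))) ∈ fl := by
          simp only [PySem.Set.contains_eq_listContains, List.contains_eq_mem,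
            PySem.Set.mem_ofList, decide_eq_true_eq]
        by_cases hmemw : ((s.drop (i + th + 5)).take (k - (i + th + 5))) ∈ fl
        · rw [if_pos hmemw]
          by_cases hcf : callFollows s.length s k = true
          · rw [if_neg (show ¬ ((!callFollows s.length s k) = true) by simp [hcf]),
              if_neg (show ¬ (((PySem.Set.ofList fl).contains _ &&
                  !callFollows s.length s k) = true) by simp [hcf])]
            exact exact_main s fl hP2 p hpocc hWne hWall hpprev hpre hmem k _ fa' fb'
              (by omega) (by omega) (by omega) hInv'
          · rw [if_pos (show (!callFollows s.length s k) = true by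
                  simp only [Bool.not_eq_true] at hcf
                  simp [hcf]),
              if_pos (show (((PySem.Set.ofList fl).contains _ &&
                  !callFollows s.length s k) = true) by
                simp only [Bool.and_eq_true]
                exact ⟨hcont.mpr hmemw, by simp [hcf]⟩)]
            exact exact_main s fl hP2 p hpocc hWne hWall hpprev hpre hmem k _ fa' fb'
              (by omega) (by omega) (by omega) hInv'
        · rw [if_neg hmemw,
            if_neg (show ¬ (((PySem.Set.ofList fl).contains _ &&
                !callFollows s.length s k) = true) by
              simp only [Bool.and_eq_true, not_and]
              intro hc'
              exact absurd (hcont.mp hc') hmemw)]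
          exact exact_main s fl hP2 p hpocc hWne hWall hpprev hpre hmem k _ fa' fb'
            (by omega) (by omega) (by omega) hInv'
termination_by i _ _ _ _ _ _ _ => s.length - i

-- ===== VERDICT (by name: the statement is the Claim_ definition above) =====
theorem better_binds_spec : Claim_unchanged_better_binds := by
  intro s lof _hDom hPre
  unfold Spec_better_binds
  intro hnD
  unfold better_binds better_binds_alt
  have h := better_binds_main s.toList (lof.map String.toList)
    (by
      intro hcon
      exact hPre.1 ⟨(PySem.Chars.endswith_iff _ _).mpr hcon.1, hcon.2⟩)
    (by
      intro hcon
      rw [← PySem.Chars.isIn_iff_infix] at hcon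
      rw [hPre.2] at hcon
      exact Bool.false_ne_true hcon)
    (by
      intro hcon
      exact hnD hcon)
    0 [] (s.toList.length + 1) (s.toList.length + 1) (by omega) (by omega) (by omega)
    (Or.inl rfl)
  rw [List.drop_zero] at h
  rw [h]

theorem better_binds_changed : Claim_changed_better_binds := by
  unfold Claim_changed_better_binds; decide

theorem better_binds_tight : Claim_exact_better_binds := by
  intro s lof _hDom hPre hD
  obtain ⟨p, hplen, hpocc, hWne, hWall, hpprev, hpre, hmem⟩ := hD
  unfold better_binds better_binds_alt
  intro hEq
  apply exact_main s.toList (lof.map String.toList)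
    (by
      intro hcon
      rw [← PySem.Chars.isIn_iff_infix] at hcon
      rw [hPre.2] at hcon
      exact Bool.false_ne_true hcon)
    p hpocc hWne hWall hpprev hpre hmem 0 [] (s.toList.length + 1) (s.toList.length + 1)
    (by omega) (by omega) (by omega) (Or.inl rfl)
  rw [List.drop_zero]
  have := congrArg String.toList hEq
  simpa using this
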